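-- pv_equiv track=rewrite | github.com/MOHAMMAD-KIMIA/Compiler | Compiler 1st phase (Lexical Analysis)/COM.py | dfaColon
-- ===== SOURCE A (Python) =====
-- def dfaColon(input_text):
--     state = 'X'
--     colon_tokens = []
--     colon_errors = []
--     position = 0
--
--     for ch in input_text:
--         position += 1
--         if ch == ':':
--             colon_tokens.append("<:>")
--         else:
--             colon_errors.append(position)
--             break
--
--     return colon_tokens, colon_errors
-- ===== SOURCE B (Python) =====
-- def dfaColon(input_text):
--     remainder = input_text.lstrip(':')
--     n = len(input_text) - len(remainder)
--     return ["<:>"] * n, ([n + 1] if remainder else [])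
-- ===== Notes on version B (the rewrite author's own statement) =====
-- stated objective: idiomatic
-- what changed: Replaces the per-character loop with a break by a direct lstrip of the colon character computing the leading-colon count, list multiplication for the tokens and an arithmetic error position.
import Mathlib
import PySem

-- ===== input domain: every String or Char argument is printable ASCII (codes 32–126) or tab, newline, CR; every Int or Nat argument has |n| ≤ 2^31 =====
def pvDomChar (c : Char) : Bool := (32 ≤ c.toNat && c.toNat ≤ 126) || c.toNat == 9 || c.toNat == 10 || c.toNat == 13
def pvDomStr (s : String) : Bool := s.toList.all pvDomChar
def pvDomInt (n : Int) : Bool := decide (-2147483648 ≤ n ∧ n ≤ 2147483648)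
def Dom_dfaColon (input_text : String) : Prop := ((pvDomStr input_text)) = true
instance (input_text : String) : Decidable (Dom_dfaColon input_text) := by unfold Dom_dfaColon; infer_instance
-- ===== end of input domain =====

-- B computes the leading-colon count via a left strip of colon characters (dropWhile) and arithmetic, replacing A's per-character loop with break (idiomatic rewrite, same cost).


-- ===== PORT A =====
-- for ch in input_text: position += 1; if ch == ':': append token else append position; break
def dfaColonLoop : List Char → Int → List String → List Int → List String × List Int
  | [], _, colon_tokens, colon_errors => (colon_tokens, colon_errors)
  | ch :: rest, pos, colon_tokens, colon_errors =>
    let position := pos + 1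
    if ch == ':' then
      dfaColonLoop rest position (colon_tokens ++ ["<:>"]) colon_errors
    else
      (colon_tokens, colon_errors ++ [position])

def dfaColon (input_text : String) : List String × List Int :=
  dfaColonLoop input_text.toList 0 [] []

-- ===== PORT B =====
def dfaColon_alt (input_text : String) : List String × List Int :=
  -- input_text.lstrip of the colon character: dropping leading colon chars is exact here
  let remainder := input_text.toList.dropWhile (· == ':')
  let n := input_text.toList.length - remainder.length
  (List.replicate n "<:>", if remainder.isEmpty then [] else [(n : Int) + 1])

-- ===== PRECONDITION & SPEC =====
def Spec_dfaColon (input_text : String) (out : List String × List Int) : Prop := out = dfaColon_alt input_text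
instance (input_text : String) (out : List String × List Int) : Decidable (Spec_dfaColon input_text out) := by unfold Spec_dfaColon; infer_instance

-- ===== CLAIM (what is proved, stated in full; the proofs are below) =====
def Claim_equal_dfaColon : Prop := ∀ (input_text : String), Dom_dfaColon input_text → Spec_dfaColon input_text (dfaColon input_text)

-- ===== LEMMAS AND PROOFS =====
lemma dfaColonLoop_eq (l : List Char) (pos : Int) (toks : List String) (errs : List Int) :
    dfaColonLoop l pos toks errs =
      (toks ++ List.replicate (l.takeWhile (· == ':')).length "<:>",
       if (l.dropWhile (· == ':')).isEmpty then errs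
       else errs ++ [pos + (l.takeWhile (· == ':')).length + 1]) := by
  induction l generalizing pos toks with
  | nil => simp [dfaColonLoop]
  | cons c rest ih =>
    by_cases hc : c == ':'
    · simp only [dfaColonLoop, hc, List.takeWhile_cons, List.dropWhile_cons, ih]
      refine Prod.ext ?_ ?_
      · simp [List.replicate_succ, List.append_assoc]
      · split <;> simp <;> ring_nf
    · simp [dfaColonLoop, hc]

lemma takeWhile_len (l : List Char) :
    (l.takeWhile (· == ':')).length = l.length - (l.dropWhile (· == ':')).length := by
  have h := congrArg List.length (List.takeWhile_append_dropWhile (p := (· == ':')) (l := l))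
  simp only [List.length_append] at h
  omega

-- ===== VERDICT (by name: the statement is the Claim_ definition above) =====
theorem dfaColon_spec : Claim_equal_dfaColon := by
  intro s _
  show dfaColon s = dfaColon_alt s
  simp only [dfaColon, dfaColon_alt, dfaColonLoop_eq, List.nil_append, ← takeWhile_len]
  split <;> simp
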